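-- pv_equiv track=rewrite | github.com/XiplusChenyu/Document-Classification-Web-Service | Model/Scripts/FileUtils.py | divide_sentence
-- ===== SOURCE A (Python) =====
-- def divide_sentence(words, seq_size):
--     """
--     divide sentence & padding
--     :param words: document
--     :param seq_size: chunk size
--     :return: list of chunks
--     """
--     if len(words) <= seq_size // 3:
--         return list()
--
--     elif len(words) <= seq_size:
--         res = [words + [1 for x in range(seq_size-len(words))]]
--     else:
--         remain = list(words)  # don't operate inplace
--         res = list()
--
--         while remain:
--             add, remain = remain[:seq_size], remain[seq_size:]
--             if len(add) < seq_size // 3: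
--                 break
--             elif len(add) < seq_size:
--                 add = add + [1 for x in range(seq_size-len(add))]
--             res.append(add)
--     return res
-- ===== SOURCE B (Python) =====
-- def divide_sentence(words, seq_size):
--     """Count-first reshape: number of full chunks and remainder computed up
--     front; full chunks via a comprehension, one padded remainder chunk
--     appended when it is long enough."""
--     n = len(words)
--     third = seq_size // 3
--     if n <= third:
--         return []
--     full = n // seq_size
--     rem = n % seq_size
--     res = [list(words[i * seq_size:(i + 1) * seq_size]) for i in range(full)]
--     if rem and rem >= third:
--         res.append(list(words[full * seq_size:]) + [1] * (seq_size - rem))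
--     return res
-- ===== Notes on version B (the rewrite author's own statement) =====
-- stated objective: simpler
-- what changed: Replaces the consume-and-break while loop (and the separate small-input elif branch) by an up-front count of full chunks and remainder: full chunks come from one comprehension over range(full) and the padded remainder is a single conditional append.
import Mathlib
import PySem

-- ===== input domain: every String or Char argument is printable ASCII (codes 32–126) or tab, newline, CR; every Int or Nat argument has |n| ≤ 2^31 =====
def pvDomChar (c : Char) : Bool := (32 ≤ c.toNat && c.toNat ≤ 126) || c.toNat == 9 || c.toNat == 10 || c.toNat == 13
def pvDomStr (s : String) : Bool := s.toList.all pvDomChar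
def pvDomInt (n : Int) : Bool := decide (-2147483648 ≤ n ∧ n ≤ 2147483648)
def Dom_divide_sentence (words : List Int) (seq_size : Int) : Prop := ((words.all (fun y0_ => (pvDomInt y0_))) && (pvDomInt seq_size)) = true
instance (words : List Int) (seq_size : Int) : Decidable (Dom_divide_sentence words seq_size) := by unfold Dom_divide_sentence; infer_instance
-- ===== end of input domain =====

-- B replaces A's consume-and-break while loop (plus a separate small-input branch) by an
-- up-front count of full chunks and remainder; objective: simpler.

-- ===== PORT A =====
-- the while loop of A; the fuel only makes the recursion total: whenever seq_size > 0 each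
-- iteration removes at least one element, so fuel = words.length + 1 never runs out there
def divideLoopA (fuel : Nat) (seq_size : Int) (remain : List Int) (res : List (List Int)) : List (List Int) :=
  match fuel with
  | 0 => res
  | fuel + 1 =>
    if remain.isEmpty then res                                    -- while remain:
    else
      let add := PySem.List.slice remain none (some seq_size)     -- remain[:seq_size]
      let remain' := PySem.List.slice remain (some seq_size) none -- remain[seq_size:]
      if (add.length : Int) < PySem.Int.floordiv seq_size 3 then res   -- break
      else
        let add' := if (add.length : Int) < seq_size              -- padding branch
          then add ++ (PySem.List.pyRange 0 (seq_size - (add.length : Int)) 1).map (fun _ => (1 : Int))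
          else add
        divideLoopA fuel seq_size remain' (res ++ [add'])         -- res.append(add)

def divide_sentence (words : List Int) (seq_size : Int) : List (List Int) :=
  if (words.length : Int) ≤ PySem.Int.floordiv seq_size 3 then []
  else if (words.length : Int) ≤ seq_size then
    [words ++ (PySem.List.pyRange 0 (seq_size - (words.length : Int)) 1).map (fun _ => (1 : Int))]
  else divideLoopA (words.length + 1) seq_size words []

-- ===== PORT B =====
def divide_sentence_alt (words : List Int) (seq_size : Int) : List (List Int) :=
  let n : Int := words.length
  let third := PySem.Int.floordiv seq_size 3
  if n ≤ third then []
  else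
    let full := PySem.Int.floordiv n seq_size
    let rem := PySem.Int.mod n seq_size
    let res := (PySem.List.pyRange 0 full 1).map
      (fun i => PySem.List.slice words (some (i * seq_size)) (some ((i + 1) * seq_size)))
    if rem ≠ 0 ∧ rem ≥ third then
      res ++ [PySem.List.slice words (some (full * seq_size)) none
                ++ List.replicate (seq_size - rem).toNat (1 : Int)]   -- [1] * (seq_size - rem)
    else res

-- ===== PRECONDITION & SPEC =====
-- Pre_ excludes exactly the inputs on which A never returns: for seq_size ≤ 0 with nonempty
-- words its while loop runs forever (remain stops shrinking), so A has no value to match.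
def Pre_divide_sentence (words : List Int) (seq_size : Int) : Prop :=
  0 < seq_size ∨ words = []
instance (words : List Int) (seq_size : Int) : Decidable (Pre_divide_sentence words seq_size) := by
  unfold Pre_divide_sentence; infer_instance

def pvWitness_divide_sentence : List Int × Int := ([2, 3, 4, 5, 6], 3)

def Spec_divide_sentence (words : List Int) (seq_size : Int) (out : List (List Int)) : Prop := out = divide_sentence_alt words seq_size
instance (words : List Int) (seq_size : Int) (out : List (List Int)) : Decidable (Spec_divide_sentence words seq_size out) := by unfold Spec_divide_sentence; infer_instance

-- ===== CLAIM (what is proved, stated in full; the proofs are below) =====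
def Claim_equal_divide_sentence : Prop := ∀ (words : List Int) (seq_size : Int), Dom_divide_sentence words seq_size → Pre_divide_sentence words seq_size → Spec_divide_sentence words seq_size (divide_sentence words seq_size)

-- ===== LEMMAS AND PROOFS =====

-- proof-side reference chunker: one step of A's loop, over a Nat chunk size
def gChunks (s : Nat) (l : List Int) : List (List Int) :=
  if _hs : s = 0 then []
  else if hl : l = [] then []
  else
    let add := l.take s
    if add.length < s / 3 then []
    else (if add.length < s then add ++ List.replicate (s - add.length) 1 else add)
         :: gChunks s (l.drop s)
termination_by l.length
decreasing_by
  simp only [List.length_drop]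
  have : l.length ≠ 0 := by simpa using hl
  omega

-- [1 for x in range(k)] is k ones
lemma padOnes (k : Int) :
    (PySem.List.pyRange 0 k 1).map (fun _ => (1 : Int)) = List.replicate k.toNat 1 := by
  rw [PySem.List.pyRange_one]
  simp [List.map_map, Function.comp_def, List.map_const']

lemma floordiv_three (s : Nat) :
    PySem.Int.floordiv (s : Int) 3 = ((s / 3 : Nat) : Int) := by
  exact_mod_cast PySem.Int.floordiv_natCast s 3

-- A's while loop computes gChunks (for a positive chunk size and enough fuel)
lemma loopA_eq_gChunks (s : Nat) (hs : 0 < s) :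
    ∀ (fuel : Nat) (remain : List Int) (res : List (List Int)),
      remain.length < fuel →
      divideLoopA fuel (s : Int) remain res = res ++ gChunks s remain := by
  intro fuel
  induction fuel with
  | zero => intro remain res h; omega
  | succ fuel ih =>
    intro remain res h
    by_cases hrem : remain = []
    · subst hrem; simp [divideLoopA, gChunks]
    · rw [divideLoopA]
      simp only [List.isEmpty_eq_false_iff.mpr hrem,
        PySem.List.slice_to_natCast, PySem.List.slice_from_natCast, floordiv_three]
      rw [gChunks]
      simp only [hs.ne', dif_neg, hrem, not_false_eq_true]
      simp only [Bool.false_eq_true, if_false]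
      by_cases hbrk : (List.take s remain).length < s / 3
      · rw [if_pos (show ((List.take s remain).length : Int) < ((s/3:Nat):Int) by exact_mod_cast hbrk),
            if_pos hbrk]
        simp
      · rw [if_neg (show ¬ ((List.take s remain).length : Int) < ((s/3:Nat):Int) by exact_mod_cast hbrk),
            if_neg hbrk]
        have hfuel : (List.drop s remain).length < fuel := by
          have : remain.length ≠ 0 := by simpa using hrem
          simp only [List.length_drop]; omega
        rw [ih (List.drop s remain) _ hfuel, List.append_assoc]
        congr 2
        by_cases hpad : (List.take s remain).length < s
        · rw [if_pos (show ((List.take s remain).length : Int) < ((s:Nat):Int) by exact_mod_cast hpad),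
            if_pos hpad]
          rw [show ((s:Int) - ((List.take s remain).length:Int)) = (((s - (List.take s remain).length : Nat)):Int) by push_cast [hpad.le]; ring]
          rw [PySem.List.pyRange_zero]
          simp [List.map_map, Function.comp_def, List.map_const']
          omega
        · rw [if_neg (show ¬ ((List.take s remain).length : Int) < ((s:Nat):Int) by exact_mod_cast hpad),
            if_neg hpad]
          simp

-- the small-document case (third < length ≤ s): one padded chunk
lemma gChunks_small (s : Nat) (hs : 0 < s) (l : List Int)
    (h1 : s / 3 < l.length) (h2 : l.length ≤ s) :
    gChunks s l = [l ++ List.replicate (s - l.length) 1] := by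
  have hl : l ≠ [] := by
    intro h; subst h; simp at h1
  rw [gChunks]
  simp only [hs.ne', dif_neg, hl, not_false_eq_true]
  rw [List.take_of_length_le h2]
  rw [if_neg (by omega)]
  rcases lt_or_eq_of_le h2 with hlt | heq
  · rw [if_pos hlt, gChunks]
    simp [List.drop_eq_nil_of_le h2]
  · rw [if_neg (by omega), gChunks]
    simp [List.drop_eq_nil_of_le h2, heq]

-- B's count-first body, over Nat arithmetic, equals gChunks (no side condition needed)
lemma altBodyNat (s : Nat) (hs : 0 < s) (l : List Int) :
    (List.range (l.length / s)).map (fun i => (l.drop (i * s)).take s)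
      ++ (if l.length % s ≠ 0 ∧ s / 3 ≤ l.length % s then
            [l.drop (l.length / s * s) ++ List.replicate (s - l.length % s) 1]
          else [])
      = gChunks s l := by
  induction hn : l.length using Nat.strong_induction_on generalizing l with
  | _ n ih =>
  subst hn
  by_cases hl : l = []
  · subst hl; simp [gChunks]
  · have hn0 : l.length ≠ 0 := by simpa using hl
    by_cases hns : l.length < s
    · have hdiv : l.length / s = 0 := Nat.div_eq_of_lt hns
      have hmod : l.length % s = l.length := Nat.mod_eq_of_lt hns
      rw [gChunks]
      simp only [hs.ne', dif_neg, hl, not_false_eq_true]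
      rw [List.take_of_length_le hns.le, hdiv, hmod]
      simp only [List.range_zero, List.map_nil, List.nil_append, Nat.zero_mul, List.drop_zero]
      by_cases hq : l.length < s / 3
      · rw [if_pos hq, if_neg (by omega)]
      · rw [if_neg hq, if_pos ⟨hn0, by omega⟩, if_pos hns, gChunks]
        simp [List.drop_eq_nil_of_le hns.le]
    · rw [not_lt] at hns
      have hdiv : l.length / s = (l.length - s) / s + 1 := Nat.div_eq_sub_div hs hns
      have hmod : l.length % s = (l.length - s) % s := Nat.mod_eq_sub_mod hns
      have hdroplen : (l.drop s).length = l.length - s := by simp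
      have ihd := ih (l.length - s) (by omega) (l.drop s) hdroplen
      rw [gChunks]
      simp only [hs.ne', dif_neg, hl, not_false_eq_true]
      have htake : (l.take s).length = s := by simp; omega
      rw [htake]
      rw [if_neg (show ¬ s < s / 3 by omega), if_neg (show ¬ s < s by omega)]
      rw [hdiv, List.range_succ_eq_map, List.map_cons]
      simp only [Nat.zero_mul, List.drop_zero]
      rw [List.cons_append]
      congr 1
      rw [← ihd, hmod]
      congr 1
      · rw [List.map_map]
        apply List.map_congr_left
        intro i _
        simp only [Function.comp_apply]
        congr 1
        rw [List.drop_drop]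
        congr 1
        simp [Nat.succ_mul, Nat.add_comm]
      · congr 3
        rw [List.drop_drop]
        congr 1
        ring

-- cast bridge: B's else-branch (as written with PySem Int arithmetic) is gChunks
lemma altBody_eq_gChunks (s : Nat) (hs : 0 < s) (l : List Int) :
    ((PySem.List.pyRange 0 (PySem.Int.floordiv (l.length : Int) (s : Int)) 1).map
        (fun i => PySem.List.slice l (some (i * (s : Int))) (some ((i + 1) * (s : Int)))))
      ++ (if PySem.Int.mod (l.length : Int) (s : Int) ≠ 0 ∧
              PySem.Int.mod (l.length : Int) (s : Int) ≥ PySem.Int.floordiv (s : Int) 3 then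
            [PySem.List.slice l (some (PySem.Int.floordiv (l.length : Int) (s : Int) * (s : Int))) none
              ++ List.replicate (((s : Int) - PySem.Int.mod (l.length : Int) (s : Int))).toNat (1 : Int)]
          else []) = gChunks s l := by
  rw [← altBodyNat s hs l]
  rw [PySem.Int.floordiv_natCast, PySem.Int.mod_natCast, floordiv_three,
    PySem.List.pyRange_zero, List.map_map]
  have hmlt : l.length % s < s := Nat.mod_lt _ hs
  congr 1
  · apply List.map_congr_left
    intro i _
    simp only [Function.comp_apply]
    have h1 : ((l.length / s : Nat) : Int) * (s : Int) = (((l.length / s) * s : Nat) : Int) := by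
      push_cast; ring
    have h2 : ((i : Int) * (s : Int)) = ((i * s : Nat) : Int) := by push_cast; ring
    have h3 : (((i : Int)) + 1) * (s : Int) = (((i + 1) * s : Nat) : Int) := by push_cast; ring
    rw [h2, h3, PySem.List.slice_natCast]
    congr 1
    rw [Nat.add_mul]
    omega
  · have hcond : (((l.length % s : Nat) : Int) ≠ 0 ∧
        ((l.length % s : Nat) : Int) ≥ ((s / 3 : Nat) : Int))
        ↔ (l.length % s ≠ 0 ∧ s / 3 ≤ l.length % s) := by
      constructor <;> intro ⟨h1, h2⟩ <;> exact ⟨by exact_mod_cast h1, by exact_mod_cast h2⟩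
    by_cases hc : l.length % s ≠ 0 ∧ s / 3 ≤ l.length % s
    · rw [if_pos (hcond.mpr hc), if_pos hc]
      have h1 : ((l.length / s : Nat) : Int) * (s : Int) = (((l.length / s) * s : Nat) : Int) := by
        push_cast; ring
      rw [h1, PySem.List.slice_from_natCast]
      have h2 : ((s : Int) - ((l.length % s : Nat) : Int)).toNat = s - l.length % s := by omega
      rw [h2]
    · rw [if_neg (fun h => hc (hcond.mp h)), if_neg hc]

-- ===== VERDICT (by name: the statement is the Claim_ definition above) =====
theorem divide_sentence_spec : Claim_equal_divide_sentence := by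
  intro words seq _ hpre
  unfold Spec_divide_sentence
  rcases hpre with hs | rfl
  · obtain ⟨s, rfl⟩ : ∃ s : Nat, seq = (s : Int) := ⟨seq.toNat, (Int.toNat_of_nonneg hs.le).symm⟩
    have hs' : 0 < s := by exact_mod_cast hs
    unfold divide_sentence divide_sentence_alt
    simp only []
    by_cases hg : ((words.length : Int) ≤ PySem.Int.floordiv (s : Int) 3)
    · rw [if_pos hg, if_pos hg]
    · rw [if_neg hg, if_neg hg]
      have hq : s / 3 < words.length := by
        rw [floordiv_three] at hg; omega
      have hA : (if (words.length : Int) ≤ (s : Int) then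
            [words ++ (PySem.List.pyRange 0 ((s : Int) - (words.length : Int)) 1).map (fun _ => (1 : Int))]
          else divideLoopA (words.length + 1) (s : Int) words []) = gChunks s words := by
        by_cases hsm : ((words.length : Int) ≤ (s : Int))
        · rw [if_pos hsm, padOnes,
            show ((s : Int) - (words.length : Int)).toNat = s - words.length by omega,
            gChunks_small s hs' words hq (by exact_mod_cast hsm)]
        · rw [if_neg hsm, loopA_eq_gChunks s hs' (words.length + 1) words [] (by omega),
            List.nil_append]
      rw [hA]
      have hB := altBody_eq_gChunks s hs' words
      by_cases hc : (PySem.Int.mod (words.length : Int) (s : Int) ≠ 0 ∧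
          PySem.Int.mod (words.length : Int) (s : Int) ≥ PySem.Int.floordiv (s : Int) 3)
      · rw [if_pos hc] at hB ⊢
        rw [hB]
      · rw [if_neg hc] at hB ⊢
        rw [List.append_nil] at hB
        rw [hB]
  · unfold divide_sentence divide_sentence_alt
    simp only [List.length_nil, Nat.cast_zero]
    by_cases hg : ((0 : Int) ≤ PySem.Int.floordiv seq 3)
    · rw [if_pos hg, if_pos hg]
    · have hseq : ¬ ((0 : Int) ≤ seq) := by
        intro h; exact hg (by simpa [PySem.Int.floordiv] using Int.fdiv_nonneg h (by norm_num))
      rw [if_neg hg, if_neg hg, if_neg hseq, divideLoopA]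
      simp [PySem.Int.floordiv, PySem.Int.mod]
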